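-- pv_equiv track=rewrite | github.com/xreyesso/sbi_pyt_project | ligsite_together.py | scan_along_diagonal
-- ===== SOURCE A (Python) =====
-- def scan_along_diagonal(grid_dimensions, voxel_grid, diagonal_vector):
--     """
--     Scan along four cubic diagonals to reduce the dependency on the protein's orientation.
--     The scan direction is given by a diagonal_vector:
--     (1, 1, 1), (1, 1, -1), (1, -1, 1), (1, -1, -1)
--     """
--     range_x, range_y, range_z = grid_dimensions
--
--     # Unpack diagonal direction
--     dx, dy, dz = diagonal_vector
--
--     # Determine starting points based on the direction
--     # We need to consider all possible starting points for the diagonal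
--     if dx > 0:
--         x_starts = range(range_x)
--     else:
--         x_starts = range(range_x - 1, -1, -1) # Start from the end
--     if dy > 0:
--         y_starts = range(range_y)
--     else:
--         y_starts = range(range_y - 1, -1, -1) # Start from the end
--
--     # Plane (x,y) scan
--     for start_x in x_starts:
--         for start_y in y_starts:
--             # Start a diagonal trace from this point
--             x, y, z = start_x, start_y, 0
--             solvent_voxels = None
--             occupied_voxel = False
--
--             # Follow the diagonal until we go out of bounds
--             while 0 <= x < range_x and 0 <= y < range_y and 0 <= z < range_z:
--                 key = (x, y, z)
--
--                 if voxel_grid[key] == -1:  # Protein voxel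
--                     occupied_voxel = True
--                     if solvent_voxels is not None:
--                         for key2 in solvent_voxels:
--                             voxel_grid[key2] += 1  # Increment solvent voxels between protein voxels
--                     solvent_voxels = []  # Reset for next potential cavity
--                 else:  # Solvent voxel
--                     if occupied_voxel:
--                         solvent_voxels.append(key)
--
--                 # Move along the diagonal
--                 x += dx
--                 y += dy
--                 z += dz
--
--     return(voxel_grid)
-- ===== SOURCE B (Python) =====
-- def scan_along_diagonal(grid_dimensions, voxel_grid, diagonal_vector):
--     """
--     Same scan, different decomposition: for each start point, first collect the
--     whole diagonal's keys, then trim the solvent run before the first protein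
--     voxel and the one after the last protein voxel, and bump every remaining
--     solvent voxel once. Mutates voxel_grid in place, like the original.
--     """
--     range_x, range_y, range_z = grid_dimensions
--     dx, dy, dz = diagonal_vector
--     x_starts = range(range_x) if dx > 0 else range(range_x - 1, -1, -1)
--     y_starts = range(range_y) if dy > 0 else range(range_y - 1, -1, -1)
--     for start_x in x_starts:
--         for start_y in y_starts:
--             # pass 1: collect the diagonal's keys (no grid reads)
--             keys = []
--             x, y, z = start_x, start_y, 0
--             while 0 <= x < range_x and 0 <= y < range_y and 0 <= z < range_z:
--                 keys.append((x, y, z))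
--                 x += dx
--                 y += dy
--                 z += dz
--             # pass 2: trim leading solvent, then (via reversal) trailing solvent
--             seg = keys
--             while seg and voxel_grid[seg[0]] != -1:
--                 seg = seg[1:]
--             seg = seg[::-1]
--             while seg and voxel_grid[seg[0]] != -1:
--                 seg = seg[1:]
--             seg = seg[::-1]
--             # pass 3: bump every solvent voxel left between the two proteins
--             for k in seg:
--                 if voxel_grid[k] != -1:
--                     voxel_grid[k] += 1
--     return voxel_grid
-- ===== Notes on version B (the rewrite author's own statement) =====
-- stated objective: alternative
-- what changed: A interleaves one stateful walk per diagonal (occupied flag plus a pending solvent-voxel accumulator flushed at each protein voxel); B instead makes separate plain passes per diagonal: collect the diagonal's keys, trim the solvent run before the first and after the last protein voxel, then increment every remaining solvent voxel once.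
import Mathlib
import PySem

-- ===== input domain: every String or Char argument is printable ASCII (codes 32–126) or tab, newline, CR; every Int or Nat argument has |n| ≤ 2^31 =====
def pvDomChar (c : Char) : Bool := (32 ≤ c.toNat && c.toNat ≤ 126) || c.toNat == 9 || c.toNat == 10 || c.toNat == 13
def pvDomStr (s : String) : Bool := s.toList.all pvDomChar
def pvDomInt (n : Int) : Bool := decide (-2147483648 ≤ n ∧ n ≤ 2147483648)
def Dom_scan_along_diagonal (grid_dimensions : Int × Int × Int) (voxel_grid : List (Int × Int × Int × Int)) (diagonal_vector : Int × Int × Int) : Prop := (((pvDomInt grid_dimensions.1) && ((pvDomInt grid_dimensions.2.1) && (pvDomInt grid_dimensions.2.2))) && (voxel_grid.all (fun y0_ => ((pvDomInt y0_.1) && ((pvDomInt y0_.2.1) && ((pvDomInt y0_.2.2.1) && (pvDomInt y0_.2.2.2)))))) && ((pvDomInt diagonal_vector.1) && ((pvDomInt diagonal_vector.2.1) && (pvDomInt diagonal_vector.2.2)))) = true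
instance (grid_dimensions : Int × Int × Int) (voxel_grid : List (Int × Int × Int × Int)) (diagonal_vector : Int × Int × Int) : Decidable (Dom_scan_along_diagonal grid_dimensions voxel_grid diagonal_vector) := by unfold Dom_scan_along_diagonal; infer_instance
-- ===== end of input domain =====

-- B replaces A's interleaved accumulator walk by three plain passes per diagonal (collect keys,
-- trim the solvent runs before the first and after the last protein voxel, bump the rest);
-- objective: alternative decomposition, same cost.  Python A and B mutate voxel_grid in place;
-- the equivalence proved here is about the returned grid (which is that same dict).

-- the voxel grid: association list (x, y, z, value), first match wins (a Python dict has unique keys)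
abbrev PvGrid := List (Int × Int × Int × Int)
abbrev PvKey := Int × Int × Int

-- dict read `voxel_grid[k]` (missing key = Python KeyError, excluded by Pre_; default 0 is never -1)
def vgGetD : PvGrid → PvKey → Int
  | [], _ => 0
  | (x, y, z, v) :: t, k => if (x, y, z) = k then v else vgGetD t k

-- dict write `voxel_grid[k] += 1`
def vgInc : PvGrid → PvKey → PvGrid
  | [], _ => []
  | (x, y, z, v) :: t, k => if (x, y, z) = k then (x, y, z, v + 1) :: t else (x, y, z, v) :: vgInc t k

-- ===== PORT A =====

-- A's `for key2 in solvent_voxels: voxel_grid[key2] += 1`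
def vgIncAll (g : PvGrid) (l : List PvKey) : PvGrid := l.foldl vgInc g

-- fuel for A's while loop: with a nonzero diagonal vector at most rx+ry+rz in-bounds steps happen
def pvFuelA (rx ry rz : Int) : Nat := rx.toNat + ry.toNat + rz.toNat + 1

-- A's `while 0 <= x < range_x and ...` trace with state (solvent_voxels, occupied_voxel)
def walkA (rx ry rz dx dy dz : Int) :
    Nat → Int → Int → Int → PvGrid → Option (List PvKey) → Bool → PvGrid
  | 0, _, _, _, g, _, _ => g
  | fuel + 1, x, y, z, g, sv, occ =>
    if 0 ≤ x ∧ x < rx ∧ 0 ≤ y ∧ y < ry ∧ 0 ≤ z ∧ z < rz then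
      if vgGetD g (x, y, z) = -1 then
        walkA rx ry rz dx dy dz fuel (x + dx) (y + dy) (z + dz)
          (match sv with | some l => vgIncAll g l | none => g) (some []) true
      else
        walkA rx ry rz dx dy dz fuel (x + dx) (y + dy) (z + dz) g
          (if occ then some (sv.getD [] ++ [(x, y, z)]) else sv) occ
    else g

def startsA (r d : Int) : List Int :=
  if d > 0 then PySem.List.pyRange 0 r 1 else PySem.List.pyRange (r - 1) (-1) (-1)

def scan_along_diagonal (grid_dimensions : Int × Int × Int) (voxel_grid : List (Int × Int × Int × Int)) (diagonal_vector : Int × Int × Int) : List (Int × Int × Int × Int) :=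
  let rx := grid_dimensions.1
  let ry := grid_dimensions.2.1
  let rz := grid_dimensions.2.2
  let dx := diagonal_vector.1
  let dy := diagonal_vector.2.1
  let dz := diagonal_vector.2.2
  (startsA rx dx).foldl (fun g start_x =>
    (startsA ry dy).foldl (fun g start_y =>
      walkA rx ry rz dx dy dz (pvFuelA rx ry rz) start_x start_y 0 g none false) g)
    voxel_grid

-- ===== PORT B =====

def pvFuelB (rx ry rz : Int) : Nat := rx.toNat + ry.toNat + rz.toNat + 1

-- B's pass 1: `while ...: keys.append((x, y, z))` — collect the diagonal's keys, no grid reads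
def collectB (rx ry rz dx dy dz : Int) : Nat → Int → Int → Int → List PvKey
  | 0, _, _, _ => []
  | fuel + 1, x, y, z =>
    if 0 ≤ x ∧ x < rx ∧ 0 ≤ y ∧ y < ry ∧ 0 ≤ z ∧ z < rz then
      (x, y, z) :: collectB rx ry rz dx dy dz fuel (x + dx) (y + dy) (z + dz)
    else []

-- B's `while seg and voxel_grid[seg[0]] != -1: seg = seg[1:]`
def trimB (g : PvGrid) : List PvKey → List PvKey
  | [] => []
  | k :: ks => if vgGetD g k ≠ -1 then trimB g ks else k :: ks

-- B's pass 3: `for k in seg: if voxel_grid[k] != -1: voxel_grid[k] += 1`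
def bumpB (g : PvGrid) (seg : List PvKey) : PvGrid :=
  seg.foldl (fun g k => if vgGetD g k ≠ -1 then vgInc g k else g) g

-- one diagonal trace of B: collect, trim front, trim back (trim the reversal), bump
def traceB (rx ry rz dx dy dz : Int) (g : PvGrid) (sx sy : Int) : PvGrid :=
  let keys := collectB rx ry rz dx dy dz (pvFuelB rx ry rz) sx sy 0
  let seg1 := trimB g keys
  let seg2 := (trimB g seg1.reverse).reverse
  bumpB g seg2

def startsB (r d : Int) : List Int :=
  if d > 0 then PySem.List.pyRange 0 r 1 else PySem.List.pyRange (r - 1) (-1) (-1)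

def scan_along_diagonal_alt (grid_dimensions : Int × Int × Int) (voxel_grid : List (Int × Int × Int × Int)) (diagonal_vector : Int × Int × Int) : List (Int × Int × Int × Int) :=
  let rx := grid_dimensions.1
  let ry := grid_dimensions.2.1
  let rz := grid_dimensions.2.2
  let dx := diagonal_vector.1
  let dy := diagonal_vector.2.1
  let dz := diagonal_vector.2.2
  (startsB rx dx).foldl (fun g start_x =>
    (startsB ry dy).foldl (fun g start_y =>
      traceB rx ry rz dx dy dz g start_x start_y) g)
    voxel_grid

-- ===== PRECONDITION & SPEC =====

-- exclusive upper bound on the step count t of any in-bounds diagonal step (small whenever the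
-- size conjunct below holds, so the bounded quantifier in Pre_ stays cheap to decide)
abbrev pvT (rx ry rz dx dy dz : Int) : Int :=
  if dz ≤ 0 then 1
  else min (min (if dx = 0 then rz / dz + 1 else rx) (if dy = 0 then rz / dz + 1 else ry)) (rz / dz + 1)

abbrev pvHasKey (g : List (Int × Int × Int × Int)) (k : Int × Int × Int) : Prop :=
  ∃ e ∈ g, (e.1, e.2.1, e.2.2.1) = k

-- Pre_: exactly the inputs on which Python A returns: the diagonal walk terminates (nonzero diagonal
-- vector, or some grid dimension empty), and every in-bounds voxel a trace can visit — cell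
-- (sx + t*dx, sy + t*dy, t*dz) for an in-bounds start (sx, sy) and step t ≥ 0 — is a key of
-- voxel_grid (on a missing visited key A raises KeyError).  The middle size conjunct is implied by
-- the key conjunct (the visited cells are pairwise distinct keys of voxel_grid), so it excludes
-- nothing; it is stated first only so that deciding Pre_ short-circuits cheaply on huge grids.
def Pre_scan_along_diagonal (grid_dimensions : Int × Int × Int) (voxel_grid : List (Int × Int × Int × Int)) (diagonal_vector : Int × Int × Int) : Prop :=
  (diagonal_vector ≠ (0, 0, 0) ∨ grid_dimensions.1 ≤ 0 ∨ grid_dimensions.2.1 ≤ 0 ∨ grid_dimensions.2.2 ≤ 0) ∧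
  ((0 < grid_dimensions.1 ∧ 0 < grid_dimensions.2.1 ∧ 0 < grid_dimensions.2.2 →
      grid_dimensions.1 * grid_dimensions.2.1 ≤ (voxel_grid.length : Int) ∧
      (diagonal_vector.1 = 0 ∧ diagonal_vector.2.1 = 0 ∧ 0 < diagonal_vector.2.2 →
        grid_dimensions.1 * grid_dimensions.2.1 * ((grid_dimensions.2.2 - 1) / diagonal_vector.2.2 + 1) ≤ (voxel_grid.length : Int))) ∧
    ∀ sx ∈ PySem.List.pyRange 0 (if 0 < grid_dimensions.1 ∧ 0 < grid_dimensions.2.1 ∧ 0 < grid_dimensions.2.2 then grid_dimensions.1 else 0) 1,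
      ∀ sy ∈ PySem.List.pyRange 0 (if 0 < grid_dimensions.1 ∧ 0 < grid_dimensions.2.1 ∧ 0 < grid_dimensions.2.2 then grid_dimensions.2.1 else 0) 1,
        ∀ t ∈ PySem.List.pyRange 0 (pvT grid_dimensions.1 grid_dimensions.2.1 grid_dimensions.2.2 diagonal_vector.1 diagonal_vector.2.1 diagonal_vector.2.2) 1,
          (0 ≤ sx + t * diagonal_vector.1 ∧ sx + t * diagonal_vector.1 < grid_dimensions.1 ∧
           0 ≤ sy + t * diagonal_vector.2.1 ∧ sy + t * diagonal_vector.2.1 < grid_dimensions.2.1 ∧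
           0 ≤ t * diagonal_vector.2.2 ∧ t * diagonal_vector.2.2 < grid_dimensions.2.2) →
          pvHasKey voxel_grid (sx + t * diagonal_vector.1, sy + t * diagonal_vector.2.1, t * diagonal_vector.2.2))

instance (grid_dimensions : Int × Int × Int) (voxel_grid : List (Int × Int × Int × Int)) (diagonal_vector : Int × Int × Int) : Decidable (Pre_scan_along_diagonal grid_dimensions voxel_grid diagonal_vector) := by unfold Pre_scan_along_diagonal; infer_instance

def pvWitness_scan_along_diagonal : (Int × Int × Int) × (List (Int × Int × Int × Int)) × (Int × Int × Int) :=
  ((2, 2, 1), [(0, 0, 0, -1), (1, 0, 0, 3), (0, 1, 0, 0), (1, 1, 0, -1)], (1, 1, 1))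

def Spec_scan_along_diagonal (grid_dimensions : Int × Int × Int) (voxel_grid : List (Int × Int × Int × Int)) (diagonal_vector : Int × Int × Int) (out : List (Int × Int × Int × Int)) : Prop := out = scan_along_diagonal_alt grid_dimensions voxel_grid diagonal_vector
instance (grid_dimensions : Int × Int × Int) (voxel_grid : List (Int × Int × Int × Int)) (diagonal_vector : Int × Int × Int) (out : List (Int × Int × Int × Int)) : Decidable (Spec_scan_along_diagonal grid_dimensions voxel_grid diagonal_vector out) := by unfold Spec_scan_along_diagonal; infer_instance

-- ===== CLAIM (what is proved, stated in full; the proofs are below) =====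
def Claim_equal_scan_along_diagonal : Prop := ∀ (grid_dimensions : Int × Int × Int) (voxel_grid : List (Int × Int × Int × Int)) (diagonal_vector : Int × Int × Int), Dom_scan_along_diagonal grid_dimensions voxel_grid diagonal_vector → Pre_scan_along_diagonal grid_dimensions voxel_grid diagonal_vector → Spec_scan_along_diagonal grid_dimensions voxel_grid diagonal_vector (scan_along_diagonal grid_dimensions voxel_grid diagonal_vector)

-- ===== LEMMAS AND PROOFS =====

-- `k` a protein voxel in grid `g`
def pvQ (g : PvGrid) (k : PvKey) : Bool := decide (vgGetD g k = -1)

-- the solvent keys of K that have a later protein key (= A's flushed accumulator contents, in order)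
def midSpec (g : PvGrid) : List PvKey → List PvKey
  | [] => []
  | k :: K => if pvQ g k then midSpec g K
              else if K.any (pvQ g) then k :: midSpec g K else midSpec g K

-- A's trace restated over the list of visited keys
def aRun : List PvKey → PvGrid → Option (List PvKey) → Bool → PvGrid
  | [], g, _, _ => g
  | k :: K, g, sv, occ =>
    if vgGetD g k = -1 then
      aRun K (match sv with | some l => vgIncAll g l | none => g) (some []) true
    else
      aRun K g (if occ then some (sv.getD [] ++ [k]) else sv) occ

theorem vgGetD_vgInc_ne (k k' : PvKey) (h : k ≠ k') :
    ∀ g : PvGrid, vgGetD (vgInc g k') k = vgGetD g k := by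
  intro g
  induction g with
  | nil => rfl
  | cons e t ih =>
    obtain ⟨x, y, z, v⟩ := e
    have h2 : ¬ k' = k := fun hh => h hh.symm
    by_cases h1 : (x, y, z) = k'
    · simp [vgInc, vgGetD, h1, h2]
    · by_cases h3 : (x, y, z) = k <;> simp [vgInc, vgGetD, h1, h3, h, ih]

theorem vgGetD_vgIncAll_notMem (k : PvKey) :
    ∀ (l : List PvKey) (g : PvGrid), k ∉ l → vgGetD (vgIncAll g l) k = vgGetD g k := by
  intro l
  induction l with
  | nil => intro g _; rfl
  | cons a l ih =>
    intro g hk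
    have hstep : vgIncAll g (a :: l) = vgIncAll (vgInc g a) l := rfl
    rw [hstep, ih _ (fun hm => hk (List.mem_cons_of_mem _ hm)),
      vgGetD_vgInc_ne k a (fun hh => hk (hh ▸ List.mem_cons_self))]


theorem walkA_eq_aRun (rx ry rz dx dy dz : Int) :
    ∀ (fuel : Nat) (x y z : Int) (g : PvGrid) (sv : Option (List PvKey)) (occ : Bool),
      walkA rx ry rz dx dy dz fuel x y z g sv occ =
        aRun (collectB rx ry rz dx dy dz fuel x y z) g sv occ := by
  intro fuel
  induction fuel with
  | zero => intro x y z g sv occ; rfl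
  | succ n ih =>
    intro x y z g sv occ
    cases sv with
    | none =>
      rw [walkA, collectB]
      by_cases hb : 0 ≤ x ∧ x < rx ∧ 0 ≤ y ∧ y < ry ∧ 0 ≤ z ∧ z < rz
      · rw [if_pos hb, if_pos hb, aRun]
        by_cases hp : vgGetD g (x, y, z) = -1
        · rw [if_pos hp, if_pos hp, ih]
        · rw [if_neg hp, if_neg hp, ih]
      · rw [if_neg hb, if_neg hb]; rfl
    | some l =>
      rw [walkA, collectB]
      by_cases hb : 0 ≤ x ∧ x < rx ∧ 0 ≤ y ∧ y < ry ∧ 0 ≤ z ∧ z < rz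
      · rw [if_pos hb, if_pos hb, aRun]
        by_cases hp : vgGetD g (x, y, z) = -1
        · rw [if_pos hp, if_pos hp, ih]
        · rw [if_neg hp, if_neg hp, ih]
      · rw [if_neg hb, if_neg hb]; rfl


theorem aRun_trim (g : PvGrid) :
    ∀ K : List PvKey, aRun K g none false = aRun (trimB g K) g none false := by
  intro K
  induction K with
  | nil => rfl
  | cons k K ih =>
    by_cases hp : vgGetD g k = -1
    · simp [trimB, hp]
    · simpa [aRun, trimB, hp] using ih


theorem trimB_eq_dropWhile (g : PvGrid) :
    ∀ K : List PvKey, trimB g K = K.dropWhile (fun k => !pvQ g k) := by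
  intro K
  induction K with
  | nil => rfl
  | cons k K ih =>
    by_cases hp : vgGetD g k = -1 <;> simp [trimB, List.dropWhile, pvQ, hp, ih]


theorem trimB_head (g : PvGrid) :
    ∀ K : List PvKey, trimB g K = [] ∨ ∃ k K₁, trimB g K = k :: K₁ ∧ pvQ g k = true := by
  intro K
  induction K with
  | nil => exact Or.inl rfl
  | cons k K ih =>
    by_cases hp : vgGetD g k = -1
    · exact Or.inr ⟨k, K, by simp [trimB, hp], by simp [pvQ, hp]⟩
    · simpa [trimB, hp] using ih


theorem midSpec_of_no_protein (g : PvGrid) :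
    ∀ K : List PvKey, K.any (pvQ g) = false → midSpec g K = [] := by
  intro K
  induction K with
  | nil => intro _; rfl
  | cons k K ih =>
    intro h
    rw [List.any_cons] at h
    have h1 : pvQ g k = false := by cases hq : pvQ g k <;> simp [hq] at h ⊢
    have h2 : K.any (pvQ g) = false := by cases ha : K.any (pvQ g) <;> simp [ha, h1] at h ⊢
    simp [midSpec, h1, h2, ih h2]


theorem vgIncAll_append (g : PvGrid) (a b : List PvKey) :
    vgIncAll g (a ++ b) = vgIncAll (vgIncAll g a) b := List.foldl_append

theorem aRun_some_true (g0 : PvGrid) :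
    ∀ (K : List PvKey) (l : List PvKey) (g : PvGrid), K.Nodup →
      (∀ k ∈ K, k ∉ l) → (∀ k ∈ K, vgGetD g k = vgGetD g0 k) →
      aRun K g (some l) true =
        if K.any (pvQ g0) then vgIncAll g (l ++ midSpec g0 K) else g := by
  intro K
  induction K with
  | nil => intro l g _ _ _; simp [aRun]
  | cons k K ih =>
    intro l g hnd hdisj hread
    have hk : vgGetD g k = vgGetD g0 k := hread k List.mem_cons_self
    rw [aRun]
    by_cases hp : vgGetD g0 k = -1
    · have hq : pvQ g0 k = true := by simp [pvQ, hp]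
      rw [if_pos (hk.trans hp)]
      have hreads' : ∀ k' ∈ K, vgGetD (vgIncAll g l) k' = vgGetD g0 k' := by
        intro k' hm
        rw [vgGetD_vgIncAll_notMem k' l g (hdisj k' (List.mem_cons_of_mem _ hm)),
          hread k' (List.mem_cons_of_mem _ hm)]
      rw [ih [] (vgIncAll g l) hnd.of_cons (fun k' _ => List.not_mem_nil) hreads']
      rw [List.any_cons, hq]
      simp only [Bool.true_or, if_true, midSpec, hq, if_true, List.nil_append]
      by_cases ha : K.any (pvQ g0) = true
      · rw [if_pos ha, vgIncAll_append]
      · rw [if_neg ha, midSpec_of_no_protein g0 K (by simpa using ha), List.append_nil]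
    · have hq : pvQ g0 k = false := by simp [pvQ, hp]
      rw [if_neg (fun hh => hp (hk.symm.trans hh))]
      have hknotK : k ∉ K := (List.nodup_cons.mp hnd).1
      have hdisj' : ∀ k' ∈ K, k' ∉ l ++ [k] := by
        intro k' hm hmem
        rcases List.mem_append.mp hmem with h1 | h1
        · exact hdisj k' (List.mem_cons_of_mem _ hm) h1
        · rw [List.mem_singleton] at h1; exact hknotK (h1 ▸ hm)
      have hread' : ∀ k' ∈ K, vgGetD g k' = vgGetD g0 k' :=
        fun k' hm => hread k' (List.mem_cons_of_mem _ hm)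
      simp only [if_true, Option.getD_some]
      rw [ih (l ++ [k]) g hnd.of_cons hdisj' hread']
      rw [List.any_cons, hq]
      simp only [Bool.false_or, midSpec, hq]
      by_cases ha : K.any (pvQ g0) = true
      · rw [if_pos ha, if_pos ha, if_pos ha]
        congr 1
        simp [List.append_assoc]
      · rw [if_neg ha, if_neg ha]


theorem bumpB_eq (g0 : PvGrid) :
    ∀ (seg : List PvKey) (g : PvGrid), seg.Nodup →
      (∀ k ∈ seg, vgGetD g k = vgGetD g0 k) →
      bumpB g seg = vgIncAll g (seg.filter (fun k => !pvQ g0 k)) := by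
  intro seg
  induction seg with
  | nil => intro g _ _; rfl
  | cons k seg ih =>
    intro g hnd hread
    have hk : vgGetD g k = vgGetD g0 k := hread k List.mem_cons_self
    have hstep : bumpB g (k :: seg) =
        bumpB (if vgGetD g k ≠ -1 then vgInc g k else g) seg := rfl
    have hknotseg : k ∉ seg := (List.nodup_cons.mp hnd).1
    by_cases hp : vgGetD g0 k = -1
    · have hq : pvQ g0 k = true := by simp [pvQ, hp]
      rw [hstep, if_neg (by rw [hk]; simpa using hp)]
      rw [ih g hnd.of_cons (fun k' hm => hread k' (List.mem_cons_of_mem _ hm))]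
      simp [hq]
    · have hq : pvQ g0 k = false := by simp [pvQ, hp]
      rw [hstep, if_pos (by rw [hk]; exact hp)]
      have hreads' : ∀ k' ∈ seg, vgGetD (vgInc g k) k' = vgGetD g0 k' := by
        intro k' hm
        rw [vgGetD_vgInc_ne k' k (fun hh => hknotseg (hh ▸ hm)),
          hread k' (List.mem_cons_of_mem _ hm)]
      rw [ih (vgInc g k) hnd.of_cons hreads']
      simp only [List.filter_cons, hq, Bool.not_false, if_true]
      rfl


theorem trim_rev_filter (g : PvGrid) :
    ∀ K : List PvKey,
      ((trimB g K.reverse).reverse).filter (fun k => !pvQ g k) = midSpec g K := by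
  intro K
  induction K with
  | nil => rfl
  | cons k K ih =>
    rw [trimB_eq_dropWhile] at ih ⊢
    rw [List.reverse_cons, List.dropWhile_append]
    by_cases he : (List.dropWhile (fun k => !pvQ g k) K.reverse).isEmpty
    · rw [if_pos he]
      have hall : ∀ x ∈ K, pvQ g x = false := by
        have h1 := List.dropWhile_eq_nil_iff.mp (List.isEmpty_iff.mp he)
        intro x hx
        simpa using h1 x (List.mem_reverse.mpr hx)
      have hany : K.any (pvQ g) = false := by
        simp only [List.any_eq_false]
        intro x hx; simp [hall x hx]
      by_cases hq : pvQ g k = true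
      · simp [List.dropWhile, hq, List.filter, midSpec, midSpec_of_no_protein g K hany]
      · simp [List.dropWhile, hq, midSpec, hany, midSpec_of_no_protein g K hany]
    · rw [if_neg he]
      have hne : List.dropWhile (fun k => !pvQ g k) K.reverse ≠ [] := by
        intro hc; rw [hc] at he; simp at he
      have hany : K.any (pvQ g) = true := by
        by_contra hc
        apply hne
        rw [List.dropWhile_eq_nil_iff]
        intro x hx
        have hx' : x ∈ K := List.mem_reverse.mp hx
        have h0 : pvQ g x = false := by
          cases hpq : pvQ g x
          · rfl
          · exact absurd (List.any_eq_true.mpr ⟨x, hx', hpq⟩) hc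
        simp [h0]
      rw [List.reverse_append, List.reverse_singleton, List.singleton_append,
        List.filter_cons]
      by_cases hq : pvQ g k = true
      · simp [hq, midSpec, ih]
      · have hq' : pvQ g k = false := by simpa using hq
        simp [hq', midSpec, hany, ih]


theorem mem_collectB (rx ry rz dx dy dz : Int) :
    ∀ (fuel : Nat) (x y z : Int) (k : PvKey), k ∈ collectB rx ry rz dx dy dz fuel x y z →
      ∃ t : Nat, k = (x + t * dx, y + t * dy, z + t * dz) := by
  intro fuel
  induction fuel with
  | zero => intro x y z k h; simp [collectB] at h
  | succ n ih =>
    intro x y z k h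
    rw [collectB] at h
    by_cases hb : 0 ≤ x ∧ x < rx ∧ 0 ≤ y ∧ y < ry ∧ 0 ≤ z ∧ z < rz
    · rw [if_pos hb] at h
      rcases List.mem_cons.mp h with h0 | h1
      · exact ⟨0, by simp [h0]⟩
      · obtain ⟨t, ht⟩ := ih _ _ _ _ h1
        refine ⟨t + 1, ?_⟩
        rw [ht]
        simp only [Prod.mk.injEq]
        push_cast
        refine ⟨by ring, by ring, by ring⟩
    · rw [if_neg hb] at h; simp at h


theorem collectB_nodup (rx ry rz dx dy dz : Int) (h : ¬(dx = 0 ∧ dy = 0 ∧ dz = 0)) :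
    ∀ (fuel : Nat) (x y z : Int), (collectB rx ry rz dx dy dz fuel x y z).Nodup := by
  intro fuel
  induction fuel with
  | zero => intro x y z; simp [collectB]
  | succ n ih =>
    intro x y z
    rw [collectB]
    by_cases hb : 0 ≤ x ∧ x < rx ∧ 0 ≤ y ∧ y < ry ∧ 0 ≤ z ∧ z < rz
    · rw [if_pos hb, List.nodup_cons]
      refine ⟨?_, ih _ _ _⟩
      intro hmem
      obtain ⟨t, ht⟩ := mem_collectB rx ry rz dx dy dz n (x + dx) (y + dy) (z + dz) _ hmem
      rw [Prod.mk.injEq, Prod.mk.injEq] at ht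
      obtain ⟨h1, h2, h3⟩ := ht
      have hpos : (0 : Int) < (t : Int) + 1 := by positivity
      apply h
      refine ⟨?_, ?_, ?_⟩
      · have h0 : ((t : Int) + 1) * dx = 0 := by linarith [h1, (by ring : x + dx + (t : Int) * dx = x + ((t : Int) + 1) * dx)]
        rcases mul_eq_zero.mp h0 with h' | h'
        · exact absurd h' (by omega)
        · exact h'
      · have h0 : ((t : Int) + 1) * dy = 0 := by linarith [h2, (by ring : y + dy + (t : Int) * dy = y + ((t : Int) + 1) * dy)]
        rcases mul_eq_zero.mp h0 with h' | h'
        · exact absurd h' (by omega)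
        · exact h'
      · have h0 : ((t : Int) + 1) * dz = 0 := by linarith [h3, (by ring : z + dz + (t : Int) * dz = z + ((t : Int) + 1) * dz)]
        rcases mul_eq_zero.mp h0 with h' | h'
        · exact absurd h' (by omega)
        · exact h'
    · rw [if_neg hb]; simp


theorem trace_eq (rx ry rz dx dy dz : Int) (sx sy : Int) (g : PvGrid)
    (hnd : (collectB rx ry rz dx dy dz (pvFuelB rx ry rz) sx sy 0).Nodup) :
    walkA rx ry rz dx dy dz (pvFuelA rx ry rz) sx sy 0 g none false =
      traceB rx ry rz dx dy dz g sx sy := by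
  have hfuel : pvFuelA rx ry rz = pvFuelB rx ry rz := rfl
  rw [hfuel, walkA_eq_aRun, aRun_trim]
  show _ = traceB rx ry rz dx dy dz g sx sy
  unfold traceB
  simp only []
  set K := collectB rx ry rz dx dy dz (pvFuelB rx ry rz) sx sy 0 with hK
  set M := trimB g K with hM
  have hMsub : M.Sublist K := by rw [hM, trimB_eq_dropWhile]; exact List.dropWhile_sublist _
  have hMnd : M.Nodup := hMsub.nodup hnd
  have hsegsub : ((trimB g M.reverse).reverse).Sublist M := by
    rw [trimB_eq_dropWhile]
    simpa using (List.dropWhile_sublist (l := M.reverse) (fun k => !pvQ g k)).reverse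
  have hsegnd := hsegsub.nodup hMnd
  rw [bumpB_eq g _ g hsegnd (fun _ _ => rfl), trim_rev_filter]
  rcases trimB_head g K with hnil | ⟨k, K₁, hcons, hq⟩
  · rw [← hM] at hnil
    rw [hnil]
    simp [aRun, midSpec, vgIncAll]
  · rw [← hM] at hcons
    rw [hcons, aRun, if_pos (by simpa [pvQ] using hq)]
    have hnd₁ : K₁.Nodup := by rw [hcons] at hMnd; exact hMnd.of_cons
    rw [aRun_some_true g K₁ [] g hnd₁ (fun _ _ => List.not_mem_nil) (fun _ _ => rfl)]
    simp only [midSpec, hq, if_true, List.nil_append]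
    by_cases ha : K₁.any (pvQ g) = true
    · rw [if_pos ha]
    · rw [if_neg ha, midSpec_of_no_protein g K₁ (by simpa using ha)]
      rfl


-- ===== VERDICT (by name: the statement is the Claim_ definition above) =====
theorem scan_along_diagonal_spec : Claim_equal_scan_along_diagonal := by
  intro gd vg dv _hdom hpre
  obtain ⟨rx, ry, rz⟩ := gd
  obtain ⟨dx, dy, dz⟩ := dv
  unfold Spec_scan_along_diagonal scan_along_diagonal scan_along_diagonal_alt
  simp only []
  have hN : ∀ sx sy : Int, (collectB rx ry rz dx dy dz (pvFuelB rx ry rz) sx sy 0).Nodup := by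
    rcases hpre.1 with hd | hr | hr | hr
    · intro sx sy
      apply collectB_nodup
      rintro ⟨h1, h2, h3⟩
      exact hd (by rw [h1, h2, h3])
    · intro sx sy
      have hr' : rx ≤ 0 := hr
      show (collectB rx ry rz dx dy dz (rx.toNat + ry.toNat + rz.toNat + 1) sx sy 0).Nodup
      rw [collectB, if_neg (by omega)]
      exact List.nodup_nil
    · intro sx sy
      have hr' : ry ≤ 0 := hr
      show (collectB rx ry rz dx dy dz (rx.toNat + ry.toNat + rz.toNat + 1) sx sy 0).Nodup
      rw [collectB, if_neg (by omega)]
      exact List.nodup_nil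
    · intro sx sy
      have hr' : rz ≤ 0 := hr
      show (collectB rx ry rz dx dy dz (rx.toNat + ry.toNat + rz.toNat + 1) sx sy 0).Nodup
      rw [collectB, if_neg (by omega)]
      exact List.nodup_nil
  have hstarts : startsA = startsB := rfl
  rw [hstarts]
  have hfun : (fun (g : PvGrid) (start_x : Int) =>
        (startsB ry dy).foldl (fun g start_y =>
          walkA rx ry rz dx dy dz (pvFuelA rx ry rz) start_x start_y 0 g none false) g) =
      (fun (g : PvGrid) (start_x : Int) =>
        (startsB ry dy).foldl (fun g start_y =>
          traceB rx ry rz dx dy dz g start_x start_y) g) := by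
    funext g sx
    congr 1
    funext g' sy
    exact trace_eq rx ry rz dx dy dz sx sy g' (hN sx sy)
  rw [hfun]
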